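-- pv_equiv track=rewrite | github.com/skripov-ds-ai/code_problems_python | not_stepik/go_away_finite_automata.py | remove_smiles_from_face
-- ===== SOURCE A (Python) =====
-- def remove_smiles_from_face(s):
--     if len(s) <= 2:
--         return s
--     p_types = {"(", ")"}
--     i = 0
--     j = 2
--     p_type = None
--     arr = []
--     while i < len(s):
--         if p_type and j >= len(s):
--             break
--
--         if s[i] != ":" or len(s) != i + 1 and s[i + 1] != "-":
--             arr.append(s[i])
--             i += 1
--             j = i + 2
--             continue
--
--         if j == i + 2:
--             if j >= len(s) or s[j] not in p_types:
--                 arr.append(s[i:i+2])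
--                 i += 2
--                 j = i + 2
--                 continue
--             if s[j] in p_types:
--                 p_type = s[j]
--
--         if p_type and s[j] != p_type:
--             p_type = None
--             i = j
--             j = i + 2
--             continue
--         j += 1
--     return "".join(arr)
-- ===== SOURCE B (Python) =====
-- def remove_smiles_from_face(s):
--     # Staged, split-based rewrite: cut the string at every colon-dash marker, then
--     # repair each following piece: a piece opening with a parenthesis loses its
--     # maximal leading run of that parenthesis (the smiley's mouth); any other
--     # piece gets its ":-" put back.  No character-by-character scan.
--     parts = s.split(":-")
--     pieces = [parts[0]]
--     for part in parts[1:]: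
--         if part[:1] in ("(", ")"):
--             pieces.append(part.lstrip(part[0]))
--         else:
--             pieces.append(":-" + part)
--     return "".join(pieces)
-- ===== Notes on version B (the rewrite author's own statement) =====
-- stated objective: simpler
-- what changed: Replaced the character automaton (two moving indices, persistent paren-type state, break/continue) by a staged split-based rewrite: cut the string at every colon-dash marker with str.split, strip the maximal leading run of a parenthesis from each following piece (or put the marker back) and join the pieces; there is no per-character scan loop.
import Mathlib
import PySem

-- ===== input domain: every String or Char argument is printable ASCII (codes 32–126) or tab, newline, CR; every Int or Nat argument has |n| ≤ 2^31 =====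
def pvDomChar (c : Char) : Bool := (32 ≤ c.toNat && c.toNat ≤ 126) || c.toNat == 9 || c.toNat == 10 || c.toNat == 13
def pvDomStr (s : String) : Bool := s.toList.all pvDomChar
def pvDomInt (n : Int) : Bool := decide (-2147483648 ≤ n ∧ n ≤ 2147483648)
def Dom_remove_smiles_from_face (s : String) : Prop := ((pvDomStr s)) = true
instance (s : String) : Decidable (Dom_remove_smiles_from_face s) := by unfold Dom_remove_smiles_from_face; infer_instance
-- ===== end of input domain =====

-- B replaces A's character automaton (two moving indices, persistent paren-type state,
-- break/continue) by a staged split-based rewrite: cut at every colon-dash marker, repair each following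
-- piece, join; objective: simpler.

-- ===== PORT A =====
-- p_types = {"(", ")"}
def pTypesA : PySem.Set Char := PySem.Set.ofList ['(', ')']

-- The while loop of A, state (i, j, p_type, arr); all Python indices stay non-negative, so Nat.
-- arr collects 1- and 2-character strings and is joined at the end; ported as the joined List Char.
-- fuel only makes the loop total; 2*len+4 is proved sufficient below (loopA_phases).
def loopA (cs : List Char) : Nat → Nat → Nat → Option Char → List Char → List Char
  | 0, _, _, _, acc => acc
  | fuel + 1, i, j, pt, acc =>
    if i < cs.length then
      if pt.isSome ∧ cs.length ≤ j then acc        -- `if p_type and j >= len(s): break`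
      else if cs.getD i ' ' ≠ ':' ∨ (cs.length ≠ i + 1 ∧ cs.getD (i + 1) ' ' ≠ '-') then
        loopA cs fuel (i + 1) (i + 3) pt (acc ++ [cs.getD i ' '])
      else if j = i + 2 then
        if cs.length ≤ j ∨ ¬ (PySem.Set.contains pTypesA (cs.getD j ' ') = true) then
          loopA cs fuel (i + 2) (i + 4) pt
            (acc ++ PySem.List.slice cs (some (i : Int)) (some ((i : Int) + 2)))
        else
          -- p_type = s[j]; then `if p_type and s[j] != p_type` is False, so j += 1
          loopA cs fuel i (j + 1) (some (cs.getD j ' ')) acc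
      else
        match pt with
        | some p =>
          if cs.getD j ' ' ≠ p then loopA cs fuel j (j + 2) none acc
          else loopA cs fuel i (j + 1) (some p) acc
        | none => loopA cs fuel i (j + 1) none acc
    else acc

def remove_smiles_from_face (s : String) : String :=
  let cs := s.toList
  if cs.length ≤ 2 then s
  else String.ofList (loopA cs (2 * cs.length + 4) 0 2 none [])

-- ===== PORT B =====
-- repair of one piece that followed a ":-" marker (the loop body of Source B):
-- a piece opening with a parenthesis loses its maximal leading run of that parenthesis
-- (part.lstrip(part[0]) with a single-char argument is exactly dropWhile on that char);
-- any other piece gets its ":-" put back.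
def procPartB (p : List Char) : List Char :=
  match p with
  | [] => [':', '-']
  | q :: t => if q = '(' ∨ q = ')' then t.dropWhile (· = q) else ':' :: '-' :: q :: t

-- parts = s.split(":-"); pieces = [parts[0]] ++ [repair(part) for part in parts[1:]]; "".join(pieces)
-- (split never returns an empty list, so parts[0] is parts.headI)
def remove_smiles_from_face_alt (s : String) : String :=
  let parts := PySem.Chars.splitOn s.toList [':', '-']
  String.ofList (parts.headI ++ parts.tail.flatMap procPartB)

-- ===== PRECONDITION & SPEC =====
def Spec_remove_smiles_from_face (s : String) (out : String) : Prop := out = remove_smiles_from_face_alt s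
instance (s : String) (out : String) : Decidable (Spec_remove_smiles_from_face s out) := by unfold Spec_remove_smiles_from_face; infer_instance

-- ===== CLAIM (what is proved, stated in full; the proofs are below) =====
def Claim_equal_remove_smiles_from_face : Prop := ∀ (s : String), Dom_remove_smiles_from_face s → Spec_remove_smiles_from_face s (remove_smiles_from_face s)

-- ===== LEMMAS AND PROOFS =====

-- the common reference point of both proofs: the recursive one-pass description of the result
def scanB : List Char → List Char
  | [] => []
  | [c] => [c]
  | [c, d] => [c, d]
  | c :: d :: p :: rest =>
    if c = ':' ∧ d = '-' ∧ (p = '(' ∨ p = ')') then scanB (rest.dropWhile (· = p))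
    else c :: scanB (d :: p :: rest)
termination_by l => l.length
decreasing_by
  · have := List.length_dropWhile_le (· = p) rest; simp_all; omega
  · simp

theorem scanB_cons_ne (c : Char) (t : List Char) (h : c ≠ ':') :
    scanB (c :: t) = c :: scanB t := by
  match t with
  | [] => simp [scanB]
  | [d] => simp [scanB]
  | d :: p :: rest => simp [scanB, h]

-- the joint invariant of A's loop, by induction on fuel
theorem loopA_phases (fuel : Nat) :
    (∀ (cs : List Char) (i : Nat) (acc : List Char),
        (cs.length - i) + (cs.length - (i + 2)) < fuel →
        loopA cs fuel i (i + 2) none acc = acc ++ scanB (cs.drop i))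
    ∧ (∀ (cs : List Char) (i j : Nat) (p : Char) (acc : List Char),
        i + 3 ≤ j → cs.getD i ' ' = ':' → cs.getD (i + 1) ' ' = '-' → i + 2 < cs.length →
        (cs.length - i) + (cs.length - j) < fuel →
        loopA cs fuel i j (some p) acc = acc ++ scanB ((cs.drop j).dropWhile (· = p))) := by
  induction fuel with
  | zero => exact ⟨fun _ _ _ h => absurd h (by omega), fun _ _ _ _ _ _ _ _ _ h => absurd h (by omega)⟩
  | succ fuel ih =>
    constructor
    · intro cs i acc hfuel
      by_cases hi : i < cs.length
      · have hdrop : cs.drop i = cs[i] :: cs.drop (i + 1) := List.drop_eq_getElem_cons hi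
        have hgi : cs.getD i ' ' = cs[i] := List.getD_eq_getElem cs ' ' hi
        by_cases hc : cs.getD i ' ' ≠ ':' ∨ (cs.length ≠ i + 1 ∧ cs.getD (i + 1) ' ' ≠ '-')
        · -- plain character: append s[i]
          have hrec := (ih).1 cs (i + 1) (acc ++ [cs.getD i ' ']) (by omega)
          have hstep : loopA cs (fuel + 1) i (i + 2) none acc
              = loopA cs fuel (i + 1) (i + 3) none (acc ++ [cs.getD i ' ']) := by
            rw [loopA, if_pos hi, if_neg (by simp), if_pos hc]
          rw [hstep]
          rw [show i + 3 = i + 1 + 2 from rfl] at hstep ⊢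
          rw [hrec, List.append_assoc]
          congr 1
          rw [hdrop, List.singleton_append]
          rcases hc with hc | ⟨hlen, hd⟩
          · rw [scanB_cons_ne _ _ (by rw [hgi] at hc; exact hc), hgi]
          · -- next char is not '-'
            have hi1 : i + 1 < cs.length := by
              rcases Nat.lt_or_ge (i + 1) cs.length with h | h
              · exact h
              · omega
            have hd1 : cs.drop (i + 1) = cs[i + 1] :: cs.drop (i + 2) := List.drop_eq_getElem_cons hi1
            have hg1 : cs.getD (i + 1) ' ' = cs[i + 1] := List.getD_eq_getElem cs ' ' hi1
            rw [hd1, hgi]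
            rcases cs.drop (i + 2) with _ | ⟨q, rest⟩
            · simp [scanB]
            · rw [scanB]
              have hno : ¬ (cs[i] = ':' ∧ cs[i + 1] = '-' ∧ (q = '(' ∨ q = ')')) := by
                intro h'; rw [hg1] at hd; exact hd h'.2.1
              simp only [hno, if_false]
        · -- s[i] = ':' and (len = i+1 or s[i+1] = '-'); j == i + 2 here
          have hci : cs.getD i ' ' = ':' := by
            by_contra h; exact hc (Or.inl h)
          have hrest : cs.length = i + 1 ∨ cs.getD (i + 1) ' ' = '-' := by
            by_cases h1 : cs.length = i + 1
            · exact Or.inl h1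
            · by_cases h2 : cs.getD (i + 1) ' ' = '-'
              · exact Or.inr h2
              · exact absurd (Or.inr ⟨h1, h2⟩) hc
          by_cases hend : cs.length ≤ i + 2 ∨ ¬ (PySem.Set.contains pTypesA (cs.getD (i + 2) ' ') = true)
          · -- no smiley: append s[i:i+2]
            have hrec := (ih).1 cs (i + 2) (acc ++ PySem.List.slice cs (some (i : Int)) (some ((i : Int) + 2))) (by omega)
            have hstep : loopA cs (fuel + 1) i (i + 2) none acc
                = loopA cs fuel (i + 2) (i + 4) none
                    (acc ++ PySem.List.slice cs (some (i : Int)) (some ((i : Int) + 2))) := by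
              rw [loopA, if_pos hi, if_neg (by simp), if_neg hc, if_pos rfl, if_pos hend]
            rw [hstep]
            rw [show i + 4 = i + 2 + 2 from rfl] at hstep ⊢
            rw [hrec, List.append_assoc]
            congr 1
            have hslice : PySem.List.slice cs (some (i : Int)) (some ((i : Int) + 2)) = (cs.drop i).take 2 := by
              have := PySem.List.slice_natCast_add (xs := cs) (j := i) (n := 2)
              simpa using this
            rw [hslice, hdrop]
            rcases h2 : cs.drop (i + 1) with _ | ⟨d, t2⟩
            · -- len = i + 1
              simp [scanB, List.drop_eq_nil_of_le,
                    show cs.length ≤ i + 2 by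
                      by_contra h
                      have := List.drop_eq_getElem_cons (l := cs) (i := i + 1) (by omega)
                      rw [h2] at this; exact List.cons_ne_nil _ _ this.symm]
            · have hi1 : i + 1 < cs.length := by
                by_contra h
                rw [List.drop_eq_nil_of_le (by omega)] at h2; exact (List.cons_ne_nil _ _) h2.symm
              have hd1 : cs.drop (i + 1) = cs[i + 1] :: cs.drop (i + 2) := List.drop_eq_getElem_cons hi1
              rw [h2] at hd1
              have hdva : d = cs[i + 1] := (List.cons_eq_cons.mp hd1).1
              have hdt : t2 = cs.drop (i + 2) := (List.cons_eq_cons.mp hd1).2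
              rcases h3 : cs.drop (i + 2) with _ | ⟨q, t3⟩
              · -- len = i + 2
                rw [hdt, h3]
                simp [scanB]
              · have hi2 : i + 2 < cs.length := by
                  by_contra h
                  rw [List.drop_eq_nil_of_le (by omega)] at h3; exact (List.cons_ne_nil _ _) h3.symm
                have hq : q = cs[i + 2] := by
                  have h' := List.drop_eq_getElem_cons hi2
                  rw [h3] at h'; injection h'
                have hnot : ¬ (q = '(' ∨ q = ')') := by
                  intro hcontra
                  rcases hend with hend | hend
                  · omega
                  · apply hend
                    have hg2 : cs.getD (i + 2) ' ' = cs[i + 2] := List.getD_eq_getElem cs ' ' hi2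
                    rw [hg2, ← hq, PySem.Set.contains_iff, pTypesA]
                    rw [PySem.Set.mem_ofList]
                    simpa using hcontra
                have hno : ¬ (cs[i] = ':' ∧ d = '-' ∧ (q = '(' ∨ q = ')')) := fun h' => hnot h'.2.2
                have hdne : d ≠ ':' := by
                  have hdm : cs.getD (i + 1) ' ' = '-' := by
                    rcases hrest with h | h
                    · omega
                    · exact h
                  rw [hdva, ← List.getD_eq_getElem cs ' ' hi1, hdm]
                  decide
                have ht2 : t2 = q :: t3 := by rw [hdt, h3]
                rw [ht2, scanB]
                simp only [hno, if_false]
                rw [scanB_cons_ne d (q :: t3) hdne]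
                simp [List.take]
          · -- smiley starts: p_type = s[i+2], j += 1, move to phase 2
            have hi2 : i + 2 < cs.length := by
              by_contra h; exact hend (Or.inl (by omega))
            have hmem : PySem.Set.contains pTypesA (cs.getD (i + 2) ' ') = true := by
              by_contra h; exact hend (Or.inr h)
            have hparen : cs.getD (i + 2) ' ' = '(' ∨ cs.getD (i + 2) ' ' = ')' := by
              have h' := hmem
              rw [PySem.Set.contains_iff, pTypesA, PySem.Set.mem_ofList] at h'
              simpa using h'
            have hdm : cs.getD (i + 1) ' ' = '-' := by
              rcases hrest with h | h
              · omega
              · exact h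
            have hrec := (ih).2 cs i (i + 3) (cs.getD (i + 2) ' ') acc (by omega) hci hdm hi2 (by omega)
            have hstep : loopA cs (fuel + 1) i (i + 2) none acc
                = loopA cs fuel i (i + 2 + 1) (some (cs.getD (i + 2) ' ')) acc := by
              rw [loopA, if_pos hi, if_neg (by simp), if_neg hc, if_pos rfl, if_neg hend]
            rw [hstep, show i + 2 + 1 = i + 3 from rfl, hrec]
            congr 1
            have hd1 : cs.drop (i + 1) = cs[i + 1] :: cs.drop (i + 2) := List.drop_eq_getElem_cons (by omega)
            have hd2 : cs.drop (i + 2) = cs[i + 2] :: cs.drop (i + 3) := List.drop_eq_getElem_cons hi2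
            rw [hdrop, hd1, hd2, scanB]
            have hcond : cs[i] = ':' ∧ cs[i + 1] = '-' ∧ (cs[i + 2] = '(' ∨ cs[i + 2] = ')') := by
              refine ⟨by rw [← hgi]; exact hci,
                      by rw [← List.getD_eq_getElem cs ' ' (by omega : i + 1 < cs.length)]; exact hdm, ?_⟩
              rw [← List.getD_eq_getElem cs ' ' hi2]; exact hparen
            rw [if_pos hcond, List.getD_eq_getElem cs ' ' hi2]
      · -- i >= len: loop exits; drop i = []
        rw [loopA, if_neg hi]
        simp [List.drop_eq_nil_of_le (by omega : cs.length ≤ i), scanB]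
    · -- phase 2: inside a smiley; i at ':', j past the run
      intro cs i j p acc hij hci hdm hi2 hfuel
      have hi : i < cs.length := by omega
      by_cases hjlen : cs.length ≤ j
      · -- break: the remaining suffix is exactly the smiley
        rw [loopA, if_pos hi, if_pos ⟨rfl, hjlen⟩]
        simp [List.drop_eq_nil_of_le hjlen, scanB]
      · push_neg at hjlen
        have hnotC : ¬ (cs.getD i ' ' ≠ ':' ∨ (cs.length ≠ i + 1 ∧ cs.getD (i + 1) ' ' ≠ '-')) := by
          push_neg; exact ⟨hci, fun _ => hdm⟩
        have hbrk : ¬ ((some p).isSome = true ∧ cs.length ≤ j) := by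
          rintro ⟨-, h⟩; omega
        have hdj : cs.drop j = cs[j] :: cs.drop (j + 1) := List.drop_eq_getElem_cons hjlen
        have hgj : cs.getD j ' ' = cs[j] := List.getD_eq_getElem cs ' ' hjlen
        by_cases hjp : cs.getD j ' ' ≠ p
        · -- run ends: i = j, p_type = None
          have hrec := (ih).1 cs j acc (by omega)
          have hstep : loopA cs (fuel + 1) i j (some p) acc = loopA cs fuel j (j + 2) none acc := by
            rw [loopA, if_pos hi, if_neg hbrk, if_neg hnotC, if_neg (by omega : ¬ j = i + 2)]
            show (if cs.getD j ' ' ≠ p then loopA cs fuel j (j + 2) none acc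
                  else loopA cs fuel i (j + 1) (some p) acc) = _
            rw [if_pos hjp]
          rw [hstep, hrec]
          congr 1
          rw [hdj, List.dropWhile_cons]
          have h' : ¬ (cs[j] = p) := by rw [← hgj]; exact hjp
          simp [h']
        · -- still inside the run: j += 1
          push_neg at hjp
          have hrec := (ih).2 cs i (j + 1) p acc (by omega) hci hdm hi2 (by omega)
          have hstep : loopA cs (fuel + 1) i j (some p) acc = loopA cs fuel i (j + 1) (some p) acc := by
            rw [loopA, if_pos hi, if_neg hbrk, if_neg hnotC, if_neg (by omega : ¬ j = i + 2)]
            show (if cs.getD j ' ' ≠ p then loopA cs fuel j (j + 2) none acc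
                  else loopA cs fuel i (j + 1) (some p) acc) = _
            rw [if_neg (by simpa using hjp)]
          rw [hstep, hrec]
          congr 1
          rw [hdj, List.dropWhile_cons]
          have h' : cs[j] = p := by rw [← hgj]; exact hjp
          simp [h']

theorem scanB_short (cs : List Char) (h : cs.length ≤ 2) : scanB cs = cs := by
  match cs with
  | [] => simp [scanB]
  | [c] => simp [scanB]
  | [c, d] => simp [scanB]
  | c :: d :: p :: rest => simp at h

theorem prefixCD {c : Char} {rest : List Char}
    (hp : [':', '-'].isPrefixOf (c :: rest) = true) : c = ':' ∧ ∃ r, rest = '-' :: r := by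
  cases rest with
  | nil => simp [List.isPrefixOf] at hp
  | cons d r =>
    simp [List.isPrefixOf] at hp
    exact ⟨hp.1.symm, r, by rw [hp.2.symm]⟩

-- clean recursive description of s.split(":-")
def splitCD : List Char → List (List Char)
  | [] => [[]]
  | c :: rest =>
    if [':', '-'].isPrefixOf (c :: rest) then [] :: splitCD rest.tail
    else (c :: (splitCD rest).headI) :: (splitCD rest).tail
termination_by l => l.length
decreasing_by
  · cases rest <;> simp <;> omega
  · simp

theorem splitCD_ne_nil (l : List Char) : splitCD l ≠ [] := by
  cases l with
  | nil => simp [splitCD]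
  | cons c rest => rw [splitCD]; split <;> simp

theorem splitCD_sep (r : List Char) : splitCD (':' :: '-' :: r) = [] :: splitCD r := by
  rw [splitCD]
  simp [List.isPrefixOf]

theorem go_eq_splitCD (fuel : Nat) :
    ∀ (l cur : List Char) (acc : List (List Char)), l.length < fuel →
      PySem.Chars.splitOn.go [':', '-'] fuel l cur acc
        = acc.reverse ++ (splitCD l).modifyHead (cur.reverse ++ ·) := by
  induction fuel with
  | zero => intro l cur acc h; omega
  | succ fuel ih =>
    intro l cur acc h
    cases l with
    | nil => simp [PySem.Chars.splitOn.go, splitCD]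
    | cons c rest =>
      rw [PySem.Chars.splitOn.go]
      by_cases hp : [':', '-'].isPrefixOf (c :: rest) = true
      · obtain ⟨hc, r, hr⟩ := prefixCD (c := c) hp
        subst hc; subst hr
        rw [if_pos hp]
        have hdrop : List.drop [':', '-'].length (':' :: '-' :: r) = r := rfl
        rw [hdrop, ih r [] (cur.reverse :: acc) (by simp at h ⊢; omega), splitCD_sep]
        cases hs : splitCD r with
        | nil => exact absurd hs (splitCD_ne_nil r)
        | cons f tl => simp
      · rw [if_neg hp]
        have := ih rest (c :: cur) acc (by simp at h ⊢; omega)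
        rw [this]
        rw [splitCD, if_neg hp]
        cases hs : splitCD rest with
        | nil => exact absurd hs (splitCD_ne_nil rest)
        | cons f tl => simp

theorem splitOn_eq_splitCD (l : List Char) :
    PySem.Chars.splitOn l [':', '-'] = splitCD l := by
  rw [PySem.Chars.splitOn]
  rw [go_eq_splitCD (l.length + 1) l [] [] (by omega)]
  cases hs : splitCD l with
  | nil => exact absurd hs (splitCD_ne_nil l)
  | cons f tl => simp

-- the glue of the split pieces, as the alt port computes it
def glueB (ps : List (List Char)) : List Char := ps.headI ++ ps.tail.flatMap procPartB

-- G/H/F: the split-and-repair pipeline computes scanB, by strong induction on the length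
theorem split_glue (n : Nat) :
    ∀ l : List Char, l.length ≤ n →
      (glueB (splitCD l) = scanB l)
      ∧ (∀ p, (p = '(' ∨ p = ')') →
          (splitCD l).headI.dropWhile (· = p) ++ (splitCD l).tail.flatMap procPartB
            = scanB (l.dropWhile (· = p)))
      ∧ ((splitCD l).flatMap procPartB = scanB (':' :: '-' :: l)) := by
  induction n with
  | zero =>
    intro l hl
    have : l = [] := List.eq_nil_of_length_eq_zero (by omega)
    subst this
    refine ⟨by simp [glueB, splitCD, scanB], fun p _ => by simp [splitCD, scanB], ?_⟩
    simp [splitCD, procPartB, scanB]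
  | succ n ih =>
    -- G first, for all l of length ≤ n+1
    have hG : ∀ l : List Char, l.length ≤ n + 1 → glueB (splitCD l) = scanB l := by
      intro l hl
      cases l with
      | nil => simp [glueB, splitCD, scanB]
      | cons c rest =>
        by_cases hp : [':', '-'].isPrefixOf (c :: rest) = true
        · obtain ⟨hc, r, hr⟩ := prefixCD (c := c) hp
          subst hc; subst hr
          rw [splitCD_sep]
          have hH := (ih r (by simp at hl; omega)).2.2
          simp only [glueB, List.headI, List.tail]
          simpa using hH
        · rw [splitCD, if_neg hp]
          cases hs : splitCD rest with
          | nil => exact absurd hs (splitCD_ne_nil rest)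
          | cons f tl =>
            have hGr := (ih rest (by simp at hl; omega)).1
            rw [hs] at hGr
            simp only [glueB, List.headI, List.tail] at hGr ⊢
            rw [List.cons_append, hGr]
            -- scanB (c :: rest) = c :: scanB rest since (c, head rest) is not ":-"
            have hns : ¬ (c = ':' ∧ rest.headI = '-') ∨ rest = [] := by
              cases rest with
              | nil => exact Or.inr rfl
              | cons d r =>
                left
                intro ⟨h1, h2⟩
                simp [List.headI] at h2
                apply hp
                simp [List.isPrefixOf, h1, h2]
            cases rest with
            | nil => simp [scanB]
            | cons d r =>
              rcases hns with hns | hns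
              · cases r with
                | nil => simp [scanB]
                | cons q t =>
                  rw [scanB]
                  have : ¬ (c = ':' ∧ d = '-' ∧ (q = '(' ∨ q = ')')) := by
                    intro ⟨h1, h2, _⟩; exact hns ⟨h1, by simp [List.headI, h2]⟩
                  simp only [this, if_false]
              · exact absurd hns (by simp)
    -- F second, for all l of length ≤ n+1 (uses G at ≤ n+1, F and H at ≤ n from ih)
    have hF : ∀ l : List Char, l.length ≤ n + 1 → ∀ p, (p = '(' ∨ p = ')') →
        (splitCD l).headI.dropWhile (· = p) ++ (splitCD l).tail.flatMap procPartB
          = scanB (l.dropWhile (· = p)) := by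
      intro l hl p hpp
      cases l with
      | nil => simp [splitCD, scanB]
      | cons q t =>
        by_cases hqp : q = p
        · subst hqp
          -- q = p is a parenthesis, so not ':': not a separator prefix
          have hp : ¬ [':', '-'].isPrefixOf (q :: t) = true := by
            intro hcon
            cases t with
            | nil => simp [List.isPrefixOf] at hcon
            | cons d r =>
              simp [List.isPrefixOf] at hcon
              rcases hpp with h | h <;> rw [h] at hcon <;> exact absurd hcon.1 (by decide)
          rw [splitCD, if_neg hp]
          cases hs : splitCD t with
          | nil => exact absurd hs (splitCD_ne_nil t)
          | cons f tl =>
            have hFt := (ih t (by simp at hl; omega)).2.1 q hpp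
            rw [hs] at hFt
            simp only [List.headI, List.tail] at hFt ⊢
            rw [List.dropWhile_cons_of_pos (by simp)]
            rw [List.dropWhile_cons_of_pos (by simp)]
            exact hFt
        · -- first char survives the dropWhile
          rw [List.dropWhile_cons_of_neg (by simp [hqp])]
          by_cases hp : [':', '-'].isPrefixOf (q :: t) = true
          · obtain ⟨hc, r, hr⟩ := prefixCD (c := q) hp
            subst hc; subst hr
            rw [splitCD_sep]
            have hH := (ih r (by simp at hl; omega)).2.2
            simp only [List.headI, List.tail]
            simpa using hH
          · rw [splitCD, if_neg hp]
            cases hs : splitCD t with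
            | nil => exact absurd hs (splitCD_ne_nil t)
            | cons f tl =>
              have hGl := hG (q :: t) hl
              rw [splitCD, if_neg hp, hs] at hGl
              simp only [glueB, List.headI, List.tail] at hGl ⊢
              rw [List.dropWhile_cons_of_neg (by simp [hqp])]
              exact hGl
    -- H third (uses G at the same length and F at length - 1)
    refine fun l hl => ⟨hG l hl, hF l hl, ?_⟩
    cases l with
    | nil => simp [splitCD, procPartB, scanB]
    | cons q t =>
      by_cases hp : [':', '-'].isPrefixOf (q :: t) = true
      · obtain ⟨hc, r, hr⟩ := prefixCD (c := q) hp
        subst hc; subst hr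
        rw [splitCD_sep]
        have hH := (ih r (by simp at hl; omega)).2.2
        -- scanB (':' :: '-' :: ':' :: '-' :: r) = ':' :: '-' :: scanB (':' :: '-' :: r)
        have e1 : scanB (':' :: '-' :: ':' :: '-' :: r) = ':' :: scanB ('-' :: ':' :: '-' :: r) := by
          rw [scanB]; simp
        have e2 : scanB ('-' :: ':' :: '-' :: r) = '-' :: scanB (':' :: '-' :: r) :=
          scanB_cons_ne '-' _ (by decide)
        rw [e1, e2]
        simp only [List.flatMap_cons, procPartB]
        rw [hH]
        rfl
      · rw [splitCD, if_neg hp]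
        cases hs : splitCD t with
        | nil => exact absurd hs (splitCD_ne_nil t)
        | cons f tl =>
          by_cases hq : q = '(' ∨ q = ')'
          · -- scanB sees the smiley
            have e : scanB (':' :: '-' :: q :: t) = scanB (t.dropWhile (· = q)) := by
              rw [scanB]; simp [hq]
            rw [e]
            have hFt := hF t (by simp at hl; omega) q hq
            rw [hs] at hFt
            simp only [List.headI, List.tail] at hFt
            simp only [List.flatMap_cons, procPartB, if_pos hq]
            exact hFt
          · -- scanB copies ':' and '-'
            have e1 : scanB (':' :: '-' :: q :: t) = ':' :: scanB ('-' :: q :: t) := by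
              rw [scanB]; simp [hq]
            have e2 : scanB ('-' :: q :: t) = '-' :: scanB (q :: t) :=
              scanB_cons_ne '-' _ (by decide)
            rw [e1, e2]
            have hGl := hG (q :: t) hl
            rw [splitCD, if_neg hp, hs] at hGl
            simp only [glueB, List.headI, List.tail] at hGl
            simp only [List.flatMap_cons, procPartB, if_neg hq]
            rw [← hGl]
            rfl

theorem alt_eq_scanB (s : String) :
    remove_smiles_from_face_alt s = String.ofList (scanB s.toList) := by
  have h := (split_glue s.toList.length s.toList (le_refl _)).1
  unfold glueB at h
  rw [← splitOn_eq_splitCD] at h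
  exact congrArg String.ofList h

-- ===== VERDICT (by name: the statement is the Claim_ definition above) =====
theorem remove_smiles_from_face_spec : Claim_equal_remove_smiles_from_face := by
  intro s _
  unfold Spec_remove_smiles_from_face remove_smiles_from_face
  rw [alt_eq_scanB]
  by_cases h : s.toList.length ≤ 2
  · simp only [h, if_true]
    rw [scanB_short _ h, String.ofList_toList]
  · simp only [h, if_false]
    have h' := (loopA_phases (2 * s.toList.length + 4)).1 s.toList 0 [] (by omega)
    simp only [List.drop_zero, List.nil_append] at h'
    rw [h']
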